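-- pv_equiv track=rewrite | github.com/kanesir123/data-structure | 第十二周/dome2.py | big
-- ===== SOURCE A (Python) =====
-- def big(ls):
--     new_ls=[]
--     count=0
--     if len(ls)==2:
--         return min(ls)
--     for i in ls:
--         if count%2==0:
--             new_ls.append(max(int(ls[count]),int(ls[count+1])))
--         count+=1
--     return big(new_ls)
-- ===== SOURCE B (Python) =====
-- def big(ls):
--     h = len(ls) // 2
--     return min(max(ls[:h]), max(ls[h:]))
-- ===== Notes on version B (the rewrite author's own statement) =====
-- stated objective: simpler
-- what changed: Replaces the recursive max-pairing tournament by its closed form: the tournament's final pair is (max of first half, max of second half), so B returns min(max(ls[:h]), max(ls[h:])) in one pass with no recursion or list rebuilding.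
import Mathlib
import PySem

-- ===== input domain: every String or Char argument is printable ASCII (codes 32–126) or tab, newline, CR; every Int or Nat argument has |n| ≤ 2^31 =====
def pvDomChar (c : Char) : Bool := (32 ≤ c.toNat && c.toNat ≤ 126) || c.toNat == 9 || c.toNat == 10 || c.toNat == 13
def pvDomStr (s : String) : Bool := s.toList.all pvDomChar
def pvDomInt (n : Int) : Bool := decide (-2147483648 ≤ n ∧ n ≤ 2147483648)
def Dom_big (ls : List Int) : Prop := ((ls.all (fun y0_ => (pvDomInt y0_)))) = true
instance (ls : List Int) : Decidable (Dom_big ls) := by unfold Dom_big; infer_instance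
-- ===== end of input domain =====

-- B is the closed form of A's max-tournament: min of the two half-maxima; equivalence is proved on power-of-two lengths (A raises/diverges elsewhere).

-- ===== PORT A =====
-- the body of A's 'for i in ls' loop: element is unused, state is (new_ls, count);
-- where Python would raise IndexError (ls[count+1] out of range) the port takes default 0 — outside Pre_big.
def bigStep (ls : List Int) (st : List Int × Int) (_i : Int) : List Int × Int :=
  if st.2 % 2 == 0 then
    (st.1 ++ [max ((PySem.List.pyGet? ls st.2).getD 0) ((PySem.List.pyGet? ls (st.2 + 1)).getD 0)], st.2 + 1)
  else (st.1, st.2 + 1)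

-- A's recursion, with fuel as a totality guard (Python recurses; fuel = ls.length suffices on Pre_big)
def bigFuel : Nat → List Int → Int
  | 0, _ => 0
  | f + 1, ls =>
    if ls.length == 2 then (PySem.List.min? ls (fun y => y)).getD 0
    else bigFuel f (ls.foldl (bigStep ls) ([], 0)).1

def big (ls : List Int) : Int := bigFuel ls.length ls

-- ===== PORT B =====
def big_alt (ls : List Int) : Int :=
  let h : Int := PySem.Int.floordiv (ls.length : Int) 2
  min ((PySem.List.max? (PySem.List.slice ls none (some h)) (fun y => y)).getD 0)
      ((PySem.List.max? (PySem.List.slice ls (some h) none) (fun y => y)).getD 0)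

-- ===== PRECONDITION & SPEC =====
-- A returns (without exception) exactly on lists whose length is a power of two ≥ 2
-- (on any other nonempty length an odd-length list appears during the reduction and ls[count+1] raises IndexError; on [] A recurses forever).
def Pre_big (ls : List Int) : Prop := 2 ≤ ls.length ∧ 2 ^ Nat.log2 ls.length = ls.length
instance (ls : List Int) : Decidable (Pre_big ls) := by unfold Pre_big; infer_instance
def pvWitness_big : List Int := [3, 1, 4, 2]

def Spec_big (ls : List Int) (out : Int) : Prop := out = big_alt ls
instance (ls : List Int) (out : Int) : Decidable (Spec_big ls out) := by unfold Spec_big; infer_instance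

-- ===== CLAIM (what is proved, stated in full; the proofs are below) =====
def Claim_equal_big : Prop := ∀ (ls : List Int), Dom_big ls → Pre_big ls → Spec_big ls (big ls)

-- ===== LEMMAS AND PROOFS =====

-- what A's loop computes on an even-length list: the list of pairwise maxima
def pairMax : List Int → List Int
  | [] => []
  | [a] => [a]
  | a :: b :: t => max a b :: pairMax t

-- A's loop body ignores the iterated element, so running it is iteration by count
def runA (ls : List Int) : Nat → (List Int × Int) → (List Int × Int)
  | 0, st => st
  | m + 1, st => runA ls m (bigStep ls st 0)

theorem foldl_eq_runA (ls : List Int) : ∀ (zs : List Int) (st : List Int × Int),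
    zs.foldl (bigStep ls) st = runA ls zs.length st := by
  intro zs
  induction zs with
  | nil => intro st; rfl
  | cons z zs ih =>
    intro st
    show zs.foldl (bigStep ls) (bigStep ls st z) = runA ls (zs.length + 1) st
    rw [ih]
    have : bigStep ls st z = bigStep ls st 0 := by
      simp [bigStep]
    rw [this]
    rfl

theorem pairMax_length_even : ∀ (u : List Int), u.length % 2 = 0 →
    2 * (pairMax u).length = u.length := by
  intro u
  induction u using pairMax.induct with
  | case1 => intro _; rfl
  | case2 a => intro h; simp at h
  | case3 a b t ih =>
    intro h
    simp [pairMax] at *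
    omega

theorem runA_pairMax : ∀ (u : List Int) (ls : List Int) (c : Nat) (acc : List Int),
    u.length % 2 = 0 → ls.drop (2 * c) = u →
    (runA ls u.length (acc, 2 * (c : Int))).1 = acc ++ pairMax u := by
  intro u
  induction u using pairMax.induct with
  | case1 => intro ls c acc _ _; simp [runA, pairMax]
  | case2 a => intro ls c acc h; simp at h
  | case3 a b t ih =>
    intro ls c acc _hev hdrop
    have hev' : t.length % 2 = 0 := by
      simp at _hev; omega
    have hget0 : PySem.List.pyGet? ls (2 * (c : Int)) = some a := by
      have h0 : (ls.drop (2 * c))[0]? = some a := by rw [hdrop]; rfl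
      rw [List.getElem?_drop] at h0
      have hc : (2 * (c : Int)) = ((2 * c : Nat) : Int) := by push_cast; ring
      rw [hc, PySem.List.pyGet?_natCast]
      simpa using h0
    have hget1 : PySem.List.pyGet? ls (2 * (c : Int) + 1) = some b := by
      have h1 : (ls.drop (2 * c))[1]? = some b := by rw [hdrop]; rfl
      rw [List.getElem?_drop] at h1
      have hc : (2 * (c : Int) + 1) = ((2 * c + 1 : Nat) : Int) := by push_cast; ring
      rw [hc, PySem.List.pyGet?_natCast]
      simpa using h1
    have hdrop' : ls.drop (2 * (c + 1)) = t := by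
      have : 2 * (c + 1) = (2 * c) + 2 := by omega
      rw [this, ← List.drop_drop, hdrop]
      rfl
    have step1 : bigStep ls (acc, 2 * (c : Int)) 0
        = (acc ++ [max a b], 2 * (c : Int) + 1) := by
      simp [bigStep, hget0, hget1]
    have step2 : bigStep ls (acc ++ [max a b], 2 * (c : Int) + 1) 0
        = (acc ++ [max a b], 2 * ((c : Int) + 1)) := by
      simp [bigStep]
      ring
    show (runA ls t.length (bigStep ls (bigStep ls (acc, 2 * (c : Int)) 0) 0)).1
        = acc ++ pairMax (a :: b :: t)
    have hcast : ((c : Int) + 1) = (((c + 1 : Nat)) : Int) := by push_cast; ring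
    rw [step1, step2, hcast, ih ls (c + 1) (acc ++ [max a b]) hev' hdrop']
    simp [pairMax]

theorem loop_eq_pairMax (ls : List Int) (hev : ls.length % 2 = 0) :
    (ls.foldl (bigStep ls) ([], 0)).1 = pairMax ls := by
  have h0 : (0 : Int) = 2 * ((0 : Nat) : Int) := by norm_num
  rw [foldl_eq_runA, h0, runA_pairMax ls ls 0 [] hev (by simp)]
  simp

-- the running max of a list, as PySem computes it
def M (u : List Int) : Int := (PySem.List.max? u (fun y => y)).getD 0

theorem M_cons (x : Int) (t : List Int) : M (x :: t) = t.foldl max x := by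
  simp [M, PySem.List.max?_id_cons]

theorem foldl_max_pairMax : ∀ (t : List Int), t.length % 2 = 0 →
    ∀ (x : Int), (pairMax t).foldl max x = t.foldl max x := by
  intro t
  induction t using pairMax.induct with
  | case1 => intro _ x; rfl
  | case2 a => intro h; simp at h
  | case3 a b t ih =>
    intro hev x
    have hev' : t.length % 2 = 0 := by simp at hev; omega
    show (pairMax t).foldl max (max x (max a b)) = t.foldl max (max (max x a) b)
    rw [ih hev', max_assoc]

theorem M_pairMax (a b : Int) (t : List Int) (hev : t.length % 2 = 0) :
    M (pairMax (a :: b :: t)) = M (a :: b :: t) := by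
  show M (max a b :: pairMax t) = M (a :: b :: t)
  rw [M_cons, M_cons, foldl_max_pairMax t hev]
  rfl

theorem pairMax_append : ∀ (xs ys : List Int), xs.length % 2 = 0 →
    pairMax (xs ++ ys) = pairMax xs ++ pairMax ys := by
  intro xs
  induction xs using pairMax.induct with
  | case1 => intro ys _; rfl
  | case2 a => intro ys h; simp at h
  | case3 a b t ih =>
    intro ys hev
    have hev' : t.length % 2 = 0 := by simp at hev; omega
    show pairMax (a :: b :: (t ++ ys)) = (max a b :: pairMax t) ++ pairMax ys
    show max a b :: pairMax (t ++ ys) = max a b :: (pairMax t ++ pairMax ys)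
    rw [ih ys hev']

theorem big_alt_halves (ls : List Int) (m : Nat) (h : ls.length = 2 * m) :
    big_alt ls = min (M (ls.take m)) (M (ls.drop m)) := by
  have hfd : PySem.Int.floordiv ((ls.length : Nat) : Int) 2 = ((m : Nat) : Int) := by
    rw [h]
    have := PySem.Int.floordiv_natCast (2 * m) 2
    push_cast at this ⊢
    omega
  simp only [big_alt, hfd, PySem.List.slice_to_natCast, PySem.List.slice_from_natCast]
  rfl

theorem main_big : ∀ (k : Nat) (ls : List Int), ls.length = 2 ^ (k + 1) →
    ∀ (fuel : Nat), k + 1 ≤ fuel → bigFuel fuel ls = big_alt ls := by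
  intro k
  induction k with
  | zero =>
    intro ls hlen fuel hf
    match fuel, hf with
    | f + 1, _ =>
      have h2 : ls.length = 2 := by simpa using hlen
      match ls, h2 with
      | [a, b], _ =>
        show (PySem.List.min? [a, b] (fun y => y)).getD 0 = big_alt [a, b]
        rw [big_alt_halves [a, b] 1 (by simp)]
        simp [PySem.List.min?, M, PySem.List.max?]
        split_ifs with h
        · simp only [Option.getD_some]; rw [min_eq_right (by omega : b ≤ a)]
        · simp only [Option.getD_some]; rw [min_eq_left (by omega : a ≤ b)]
  | succ k ih =>
    intro ls hlen fuel hf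
    match fuel, hf with
    | f + 1, hf =>
      have hne : (ls.length == 2) = false := by
        have h4 : 2 ^ 2 ≤ 2 ^ (k + 1 + 1) := Nat.pow_le_pow_right (by omega) (by omega)
        simp only [beq_eq_false_iff_ne, ne_eq, hlen]
        omega
      have hev : ls.length % 2 = 0 := by
        rw [hlen, pow_succ]; omega
      show (if (ls.length == 2) then (PySem.List.min? ls (fun y => y)).getD 0
            else bigFuel f (ls.foldl (bigStep ls) ([], 0)).1) = big_alt ls
      rw [if_neg (by simp [hne])]
      rw [loop_eq_pairMax ls hev]
      have hplen : (pairMax ls).length = 2 ^ (k + 1) := by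
        have := pairMax_length_even ls hev
        rw [hlen] at this
        have h2 : 2 ^ (k + 1 + 1) = 2 * 2 ^ (k + 1) := by ring
        omega
      rw [ih (pairMax ls) hplen f (by omega)]
      -- B gives the same value on ls and on its pairwise-max reduction
      set m : Nat := 2 ^ (k + 1) with hm
      have hme : m % 2 = 0 := by
        rw [hm]; simp [Nat.pow_succ]
      have hm1 : 1 ≤ m := Nat.one_le_two_pow
      obtain ⟨xs, ys, hsplit, hxlen, hylen⟩ :
          ∃ xs ys, ls = xs ++ ys ∧ xs.length = m ∧ ys.length = m := by
        refine ⟨ls.take m, ls.drop m, (List.take_append_drop m ls).symm, ?_, ?_⟩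
        · simp [hlen]; omega
        · simp [hlen]; omega
      subst hsplit
      rw [pairMax_append xs ys (by omega)]
      have hpx : 2 * (pairMax xs).length = m := by
        rw [← hxlen]; exact pairMax_length_even xs (by omega)
      have hpy : 2 * (pairMax ys).length = m := by
        rw [← hylen]; exact pairMax_length_even ys (by omega)
      rw [big_alt_halves (pairMax xs ++ pairMax ys) (pairMax xs).length (by simp; omega)]
      rw [big_alt_halves (xs ++ ys) m (by simp; omega)]
      rw [List.take_left, List.drop_left, List.take_left' hxlen, List.drop_left' hxlen]
      -- now: min (M (pairMax xs)) (M (pairMax ys)) = min (M xs) (M ys)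
      have hx : M (pairMax xs) = M xs := by
        match xs, hxlen with
        | a :: b :: t, hxlen =>
          exact M_pairMax a b t (by simp at hxlen; omega)
        | [], hxlen => simp at hxlen; omega
        | [a], hxlen => simp at hxlen; omega
      have hy : M (pairMax ys) = M ys := by
        match ys, hylen with
        | a :: b :: t, hylen =>
          exact M_pairMax a b t (by simp at hylen; omega)
        | [], hylen => simp at hylen; omega
        | [a], hylen => simp at hylen; omega
      rw [hx, hy]

-- ===== VERDICT (by name: the statement is the Claim_ definition above) =====
theorem big_spec : Claim_equal_big := by
  intro ls _ hpre
  obtain ⟨h2, hpow⟩ := hpre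
  set e := Nat.log2 ls.length with he
  have he1 : 1 ≤ e := by
    by_contra h
    have : e = 0 := by omega
    rw [this] at hpow
    omega
  have hlen : ls.length = 2 ^ ((e - 1) + 1) := by
    rw [← hpow]; congr 1; omega
  show big ls = big_alt ls
  unfold big
  apply main_big (e - 1) ls hlen
  have : e < 2 ^ e := Nat.lt_two_pow_self
  omega
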